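-- pv_equiv track=rewrite | github.com/kedarsutar-git/Strivers_DSA_problem | 04_Binary search/Binary_Search_on_answers/01FInd_square_root_using_BS.py | sqr_root
-- ===== SOURCE A (Python) =====
-- def sqr_root(num:int) -> int:
--
--     if num < 2:
--         return num
--
--     left, right, ans = 1, num // 2, 0
--
--     while left <= right:
--         mid = (left + right) // 2
--
--         if mid * mid <= num:
--             ans = mid
--             left = mid + 1
--         else:
--             right = mid - 1
--
--
--     return ans
-- ===== SOURCE B (Python) =====
-- def sqr_root(num: int) -> int:
--     if num < 2:
--         return num
--     x = num
--     y = (x + num // x) // 2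
--     while y < x:
--         x = y
--         y = (x + num // x) // 2
--     return x
-- ===== Notes on version B (the rewrite author's own statement) =====
-- stated objective: alternative
-- what changed: Replaced the binary search over a shrinking interval by Newton's integer iteration that refines a single estimate via x -> (x + num // x) // 2 until it stops decreasing.
import Mathlib
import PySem

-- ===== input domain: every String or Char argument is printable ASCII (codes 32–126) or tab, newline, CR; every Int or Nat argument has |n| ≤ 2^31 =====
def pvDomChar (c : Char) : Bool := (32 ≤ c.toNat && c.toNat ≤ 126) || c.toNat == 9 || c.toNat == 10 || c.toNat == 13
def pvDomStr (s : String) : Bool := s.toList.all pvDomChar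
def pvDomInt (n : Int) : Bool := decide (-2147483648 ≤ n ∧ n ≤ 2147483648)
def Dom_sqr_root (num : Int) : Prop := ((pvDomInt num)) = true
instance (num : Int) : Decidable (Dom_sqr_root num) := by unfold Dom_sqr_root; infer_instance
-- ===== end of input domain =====

-- B replaces A's binary search by Newton's integer iteration (same values, similar cost).

-- ===== PORT A =====
-- the while-loop of A: state (left, right, ans)
def sqrLoopA (num left right ans : Int) : Int :=
  if h : left ≤ right then
    let mid := PySem.Int.floordiv (left + right) 2
    if mid * mid ≤ num then sqrLoopA num (mid + 1) right mid
    else sqrLoopA num left (mid - 1) ans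
  else ans
termination_by (right - left + 1).toNat
decreasing_by
  · have := PySem.Int.floordiv_two_mid_bounds h; omega
  · have := PySem.Int.floordiv_two_mid_bounds h; omega

def sqr_root (num : Int) : Int :=
  if num < 2 then num
  else sqrLoopA num 1 (PySem.Int.floordiv num 2) 0

-- ===== PORT B =====
-- the while-loop of B: state (x, y); fuel only makes the recursion total (num.toNat always suffices)
def sqrLoopB (fuel : Nat) (num x y : Int) : Int :=
  match fuel with
  | 0 => x
  | fuel + 1 =>
      if y < x then
        sqrLoopB fuel num y (PySem.Int.floordiv (y + PySem.Int.floordiv num y) 2)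
      else x

def sqr_root_alt (num : Int) : Int :=
  if num < 2 then num
  else
    let x := num
    let y := PySem.Int.floordiv (x + PySem.Int.floordiv num x) 2
    sqrLoopB num.toNat num x y

-- ===== PRECONDITION & SPEC =====
def Spec_sqr_root (num : Int) (out : Int) : Prop := out = sqr_root_alt num
instance (num : Int) (out : Int) : Decidable (Spec_sqr_root num out) := by unfold Spec_sqr_root; infer_instance

-- ===== CLAIM (what is proved, stated in full; the proofs are below) =====
def Claim_equal_sqr_root : Prop := ∀ (num : Int), Dom_sqr_root num → Spec_sqr_root num (sqr_root num)

-- ===== LEMMAS AND PROOFS =====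

-- r is the floor of the square root of num
def IsSqrt (num r : Int) : Prop := 0 ≤ r ∧ r * r ≤ num ∧ num < (r + 1) * (r + 1)

theorem isSqrt_unique {num r t : Int} (hr : IsSqrt num r) (ht : IsSqrt num t) : r = t := by
  obtain ⟨hr0, hr1, hr2⟩ := hr; obtain ⟨ht0, ht1, ht2⟩ := ht
  have h1 : r < t + 1 := by nlinarith
  have h2 : t < r + 1 := by nlinarith
  omega

theorem isSqrt_exists {num : Int} (h : 0 ≤ num) : ∃ r, IsSqrt num r := by
  refine ⟨(num.toNat.sqrt : Int), by positivity, ?_, ?_⟩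
  · have h : ((num.toNat.sqrt * num.toNat.sqrt : Nat) : Int) ≤ ((num.toNat : Nat) : Int) :=
      Int.ofNat_le.mpr (by simpa [pow_two] using Nat.sqrt_le' num.toNat)
    push_cast at h; omega
  · have h : ((num.toNat : Nat) : Int) < (((num.toNat.sqrt + 1) * (num.toNat.sqrt + 1) : Nat) : Int) :=
      Int.ofNat_lt.mpr (by simpa [pow_two, Nat.succ_eq_add_one] using Nat.lt_succ_sqrt' num.toNat)
    push_cast at h; omega

theorem sqrLoopA_isSqrt (num : Int) : ∀ left right ans : Int,
    1 ≤ left → ans = left - 1 → ans * ans ≤ num → num < (right + 1) * (right + 1) →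
    -1 ≤ right → IsSqrt num (sqrLoopA num left right ans) := by
  intro left right ans
  induction left, right, ans using sqrLoopA.induct num with
  | case1 left right ans h mid hle ih =>
    intro h1 h2 h3 h4 h5
    have hmid := PySem.Int.floordiv_two_mid_bounds h
    rw [sqrLoopA]
    simp only [h, dif_pos]
    rw [if_pos hle]
    exact ih (by omega) (by omega) hle h4 h5
  | case2 left right ans h mid hgt ih =>
    intro h1 h2 h3 h4 h5
    have hmid := PySem.Int.floordiv_two_mid_bounds h
    rw [sqrLoopA]
    simp only [h, dif_pos]
    rw [if_neg hgt]
    have hsq : (mid - 1 + 1) * (mid - 1 + 1) = mid * mid := by ring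
    exact ih h1 h2 h3 (by omega) (by omega)
  | case3 left right ans h =>
    intro h1 h2 h3 h4 h5
    rw [sqrLoopA]
    simp only [h, dif_neg, not_false_iff]
    refine ⟨by omega, h3, ?_⟩
    have hle : right + 1 ≤ ans + 1 := by omega
    nlinarith

-- Newton step never undershoots the square root (integer AM–GM)
theorem newton_lb {num x s : Int} (hx : 1 ≤ x) (hs : 0 ≤ s) (hss : s * s ≤ num) :
    s ≤ PySem.Int.floordiv (x + PySem.Int.floordiv num x) 2 := by
  set d := PySem.Int.floordiv num x with hd
  have hb : d * x ≤ num ∧ num < (d + 1) * x :=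
    (PySem.Int.floordiv_eq_iff_of_pos (by omega)).mp hd.symm
  have hxd : 2 * s ≤ x + d := by
    by_contra hcon
    push Not at hcon
    nlinarith [sq_nonneg (s - x)]
  rw [PySem.Int.le_floordiv_iff_mul_le (by norm_num)]
  omega

-- above the root, the Newton step strictly decreases
theorem newton_descent {num x s : Int} (hs : IsSqrt num s) (hx : s + 1 ≤ x) :
    PySem.Int.floordiv (x + PySem.Int.floordiv num x) 2 < x := by
  obtain ⟨hs0, _, hs2⟩ := hs
  have hxpos : 0 < x := by omega
  have hnum : num < x * x := by nlinarith
  have hd : PySem.Int.floordiv num x < x :=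
    (PySem.Int.floordiv_lt_iff_lt_mul hxpos).mpr hnum
  rw [PySem.Int.floordiv_lt_iff_lt_mul (by norm_num)]
  omega

theorem sqrLoopB_isSqrt (num s : Int) (hs : IsSqrt num s) (hs1 : 1 ≤ s) :
    ∀ (fuel : Nat) (x y : Int), s ≤ x →
      y = PySem.Int.floordiv (x + PySem.Int.floordiv num x) 2 →
      (x - s).toNat ≤ fuel → sqrLoopB fuel num x y = s := by
  intro fuel
  induction fuel with
  | zero =>
    intro x y hsx hy hfuel
    have : x = s := by omega
    simpa [sqrLoopB] using this
  | succ fuel ih =>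
    intro x y hsx hy hfuel
    rw [sqrLoopB]
    by_cases hyx : y < x
    · rw [if_pos hyx]
      have hsy : s ≤ y := hy ▸ newton_lb (by omega) (by omega) hs.2.1
      exact ih y _ hsy rfl (by omega)
    · rw [if_neg hyx]
      by_contra hne
      have hx1 : s + 1 ≤ x := by omega
      have := hy ▸ newton_descent hs hx1
      omega

theorem sqr_root_alt_isSqrt {num : Int} (h : 2 ≤ num) : IsSqrt num (sqr_root_alt num) := by
  obtain ⟨s, hs⟩ := isSqrt_exists (by omega : (0:Int) ≤ num)
  have hs1 : 1 ≤ s := by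
    obtain ⟨hs0, _, hs2⟩ := hs
    by_contra hcon
    have : s = 0 := by omega
    subst this; simp at hs2; omega
  have hsn : s ≤ num := by nlinarith [hs.2.1]
  have := sqrLoopB_isSqrt num s hs hs1 num.toNat num
    (PySem.Int.floordiv (num + PySem.Int.floordiv num num) 2) hsn rfl (by omega)
  rw [sqr_root_alt, if_neg (by omega)]
  exact this ▸ hs

-- ===== VERDICT (by name: the statement is the Claim_ definition above) =====
theorem sqr_root_spec : Claim_equal_sqr_root := by
  intro num _
  unfold Spec_sqr_root
  by_cases h2 : num < 2
  · rw [sqr_root, sqr_root_alt, if_pos h2, if_pos h2]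
  · push_neg at h2
    have hA : IsSqrt num (sqr_root num) := by
      rw [sqr_root, if_neg (by omega)]
      have hq : 1 ≤ PySem.Int.floordiv num 2 ∧ 2 * PySem.Int.floordiv num 2 ≤ num ∧
          num ≤ 2 * PySem.Int.floordiv num 2 + 1 := by
        rw [PySem.Int.floordiv_eq_ediv_of_pos (by norm_num)]
        omega
      refine sqrLoopA_isSqrt num 1 _ 0 (by omega) (by omega) (by omega) ?_ (by omega)
      nlinarith [hq.1, hq.2.2]
    exact isSqrt_unique hA (sqr_root_alt_isSqrt h2)
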